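-- pv_equiv track=rewrite | github.com/miliar/Code_Jam_Webscraper | solutions_python/Problem_179/1914.py | jam_list
-- ===== SOURCE A (Python) =====
-- from itertools import count
--
-- def jam_list(N,J):
--     deci_list = []
--     for k in count(2**(N-1)+1,6):
--         if len(deci_list) == J:
--             break
--         temp = bin(k)[2:]
--         status = True
--         for m in range(3, 11):
--             if int(temp, m) % (m+1) != 0:
--                 status = False
--                 break
--         if status:
--             deci_list.append(temp)
--     return deci_list
-- ===== SOURCE B (Python) =====
-- def jam_list(N, J):
--     deci_list = []
--     k = 2 ** (N - 1) + 1
--     while len(deci_list) < J: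
--         temp = bin(k)[2:]
--         # base m ~ -1 (mod m+1) for every m, so int(temp, m) % (m+1) depends only on
--         # the alternating digit sum s; the eight tests of A hold iff lcm(4..11) = 27720 divides s.
--         s = 0
--         for c in temp:
--             s = (1 if c == '1' else 0) - s
--         if s % 27720 == 0:
--             deci_list.append(temp)
--         k += 6
--     return deci_list
-- ===== Notes on version B (the rewrite author's own statement) =====
-- stated objective: alternative
-- what changed: Per candidate, B replaces A's eight base-m reinterpretations of the binary string (int(temp, m) % (m+1) for m = 3..10) by a single pass computing the alternating digit sum, tested once against lcm(4..11) = 27720.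
import Mathlib
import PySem

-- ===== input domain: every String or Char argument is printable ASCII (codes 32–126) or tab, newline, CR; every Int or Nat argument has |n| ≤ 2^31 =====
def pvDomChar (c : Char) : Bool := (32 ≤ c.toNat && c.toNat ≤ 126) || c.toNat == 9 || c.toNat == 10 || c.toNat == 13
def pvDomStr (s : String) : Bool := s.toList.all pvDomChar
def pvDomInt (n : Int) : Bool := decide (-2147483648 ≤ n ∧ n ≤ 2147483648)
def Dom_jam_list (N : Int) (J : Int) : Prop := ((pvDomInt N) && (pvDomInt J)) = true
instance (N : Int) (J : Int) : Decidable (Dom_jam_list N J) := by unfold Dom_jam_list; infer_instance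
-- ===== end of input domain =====

-- B replaces A's eight per-candidate base-m conversions by a single alternating-bit-sum pass
-- tested against 27720 = lcm(4..11): an alternative one-pass test with the same return value.


-- ===== PORT A =====
-- hand port of bin(k)[2:] for k ≥ 1 (binary digits, most significant first): exact there,
-- which is the only way both Pythons call it (k ≥ 2 on every admitted input)
def binNatRev (n : Nat) : List Char :=
  if h : n = 0 then [] else (if n % 2 = 1 then '1' else '0') :: binNatRev (n / 2)
decreasing_by exact Nat.div_lt_self (Nat.pos_of_ne_zero h) (by omega)

def pyBinTail (k : Int) : List Char := (binNatRev k.toNat).reverse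

-- fuel for the (in Python unbounded) search loop: totality guard only, identical in both ports
def jamFuel (J : Int) : Nat := 1000 + 64 * J.toNat

-- hand port of int(temp, m): exact on the nonempty '0'/'1' digit strings A parses
def intBase (cs : List Char) (m : Int) : Int :=
  cs.foldl (fun a c => a * m + (if c = '1' then 1 else 0)) 0

-- A's inner `for m in range(3, 11)` with its early break
def statusA (cs : List Char) (m : Nat) : Bool :=
  if 11 ≤ m then true
  else if ¬ (PySem.Int.mod (intBase cs (m : Int)) ((m : Int) + 1) = 0) then false
  else statusA cs (m + 1)
termination_by 11 - m

def loopA : Nat → Int → Int → List String → List String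
  | 0, _, _, acc => acc
  | fuel + 1, k, J, acc =>
    if PySem.List.len acc = J then acc
    else
      let temp := pyBinTail k
      loopA fuel (k + 6) J (if statusA temp 3 then acc ++ [String.ofList temp] else acc)

def jam_list (N : Int) (J : Int) : List String :=
  loopA (jamFuel J) (2 ^ (N - 1).toNat + 1) J []

-- ===== PORT B =====
def loopB : Nat → Int → Int → List String → List String
  | 0, _, _, acc => acc
  | fuel + 1, k, J, acc =>
    if PySem.List.len acc < J then
      let temp := pyBinTail k
      let s := temp.foldl (fun s c => (if c = '1' then 1 else 0) - s) 0
      loopB fuel (k + 6) J (if PySem.Int.mod s 27720 = 0 then acc ++ [String.ofList temp] else acc)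
    else acc

def jam_list_alt (N : Int) (J : Int) : List String :=
  loopB (jamFuel J) (2 ^ (N - 1).toNat + 1) J []

-- ===== PRECONDITION & SPEC =====
-- Pre_ excludes exactly the inputs where Python A does not return: J < 0 (the break test
-- `len == J` never fires: infinite loop), J ≥ 1 with N ≤ 0 (2**(N-1) is a float, bin() raises
-- TypeError), J ≥ 1 with N odd (every candidate k ≡ 2 (mod 3), so no string ever passes the
-- divisibility tests and the search loops forever), and J ≥ 1 with N > 4300 (int(temp, 3)
-- raises ValueError: CPython's 4300-digit limit for non-power-of-two base conversion).
def Pre_jam_list (N : Int) (J : Int) : Prop :=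
  0 ≤ J ∧ (J = 0 ∨ (2 ≤ N ∧ N % 2 = 0 ∧ N ≤ 4300))
instance (N : Int) (J : Int) : Decidable (Pre_jam_list N J) := by unfold Pre_jam_list; infer_instance

def pvWitness_jam_list : Int × Int := (4, 3)

def Spec_jam_list (N : Int) (J : Int) (out : List String) : Prop := out = jam_list_alt N J
instance (N : Int) (J : Int) (out : List String) : Decidable (Spec_jam_list N J out) := by unfold Spec_jam_list; infer_instance

-- ===== CLAIM (what is proved, stated in full; the proofs are below) =====
def Claim_equal_jam_list : Prop := ∀ (N : Int) (J : Int), Dom_jam_list N J → Pre_jam_list N J → Spec_jam_list N J (jam_list N J)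

-- ===== LEMMAS AND PROOFS =====

-- Horner evaluation in base m and the alternating fold agree modulo m+1
theorem horner_sub_dvd (cs : List Char) (m : Int) :
    ∀ a b : Int, (m + 1) ∣ (a - b) →
    (m + 1) ∣ (List.foldl (fun a c => a * m + (if c = '1' then 1 else 0)) a cs
               - List.foldl (fun s c => (if c = '1' then (1 : Int) else 0) - s) b cs) := by
  induction cs with
  | nil => intro a b h; simpa using h
  | cons c cs ih =>
    intro a b h
    simp only [List.foldl_cons]
    apply ih
    have : (a * m + (if c = '1' then (1:Int) else 0)) - ((if c = '1' then (1:Int) else 0) - b)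
        = a * (m + 1) - (a - b) := by ring
    rw [this]
    exact dvd_sub (dvd_mul_left (m + 1) a) h

theorem dvd_intBase_iff (cs : List Char) (m : Int) :
    ((m + 1) ∣ intBase cs m) ↔
    ((m + 1) ∣ List.foldl (fun s c => (if c = '1' then (1 : Int) else 0) - s) 0 cs) := by
  have h := horner_sub_dvd cs m 0 0 (by simp)
  unfold intBase
  constructor
  · intro hx
    have := dvd_sub hx h
    simpa using this
  · intro hy
    have := dvd_add h hy
    simpa using this

theorem status_step (cs : List Char) (m : Nat) (h : ¬ 11 ≤ m) :
    statusA cs m = (decide (PySem.Int.mod (intBase cs (m : Int)) ((m : Int) + 1) = 0) && statusA cs (m + 1)) := by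
  rw [statusA, if_neg h]
  by_cases hc : PySem.Int.mod (intBase cs (m : Int)) ((m : Int) + 1) = 0
  · rw [if_neg (not_not_intro hc), decide_eq_true hc, Bool.true_and]
  · rw [if_pos hc, decide_eq_false hc, Bool.false_and]

theorem status_end (cs : List Char) : statusA cs 11 = true := by
  rw [statusA]; simp

theorem lcm_bridge (S : Int) :
    ((4:Int) ∣ S ∧ (5:Int) ∣ S ∧ (6:Int) ∣ S ∧ (7:Int) ∣ S ∧
     (8:Int) ∣ S ∧ (9:Int) ∣ S ∧ (10:Int) ∣ S ∧ (11:Int) ∣ S) ↔ (27720:Int) ∣ S := by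
  constructor
  · rintro ⟨h4, h5, h6, h7, h8, h9, h10, h11⟩
    have c89 : IsCoprime (8:Int) 9 := by rw [Int.isCoprime_iff_gcd_eq_one]; decide
    have c725 : IsCoprime (72:Int) 5 := by rw [Int.isCoprime_iff_gcd_eq_one]; decide
    have c3607 : IsCoprime (360:Int) 7 := by rw [Int.isCoprime_iff_gcd_eq_one]; decide
    have c252011 : IsCoprime (2520:Int) 11 := by rw [Int.isCoprime_iff_gcd_eq_one]; decide
    exact c252011.mul_dvd (c3607.mul_dvd (c725.mul_dvd (c89.mul_dvd h8 h9) h5) h7) h11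
  · intro h
    exact ⟨dvd_trans (by norm_num) h, dvd_trans (by norm_num) h, dvd_trans (by norm_num) h,
           dvd_trans (by norm_num) h, dvd_trans (by norm_num) h, dvd_trans (by norm_num) h,
           dvd_trans (by norm_num) h, dvd_trans (by norm_num) h⟩

theorem status_iff (cs : List Char) :
    statusA cs 3 = true ↔
    (27720 : Int) ∣ List.foldl (fun s c => (if c = '1' then (1 : Int) else 0) - s) 0 cs := by
  have key : ∀ m : Nat, (PySem.Int.mod (intBase cs (m : Int)) ((m : Int) + 1) = 0) ↔
      ((m : Int) + 1) ∣ List.foldl (fun s c => (if c = '1' then (1 : Int) else 0) - s) 0 cs := by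
    intro m
    rw [PySem.Int.mod_eq_zero_iff_dvd]
    exact dvd_intBase_iff cs (m : Int)
  rw [status_step cs 3 (by omega), status_step cs 4 (by omega), status_step cs 5 (by omega),
      status_step cs 6 (by omega), status_step cs 7 (by omega), status_step cs 8 (by omega),
      status_step cs 9 (by omega), status_step cs 10 (by omega), status_end]
  simp only [Bool.and_true, Bool.and_eq_true, decide_eq_true_eq]
  rw [key 3, key 4, key 5, key 6, key 7, key 8, key 9, key 10]
  rw [← lcm_bridge]
  norm_num

-- the two loops agree whenever the accumulator has not yet outgrown J
theorem loop_eq (fuel : Nat) : ∀ (k J : Int) (acc : List String),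
    0 ≤ J → (acc.length : Int) ≤ J → loopA fuel k J acc = loopB fuel k J acc := by
  induction fuel with
  | zero => intro k J acc _ _; rfl
  | succ fuel ih =>
    intro k J acc hJ hlen
    rw [loopA, loopB]
    simp only [PySem.List.len_eq]
    by_cases he : (acc.length : Int) = J
    · rw [if_pos he, if_neg (show ¬ ((acc.length : Int) < J) by omega)]
    · rw [if_neg he, if_pos (show (acc.length : Int) < J by omega)]
      have hcond : (statusA (pyBinTail k) 3 = true) ↔
          (PySem.Int.mod (List.foldl (fun s c => (if c = '1' then (1:Int) else 0) - s) 0 (pyBinTail k)) 27720 = 0) := by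
        rw [status_iff, PySem.Int.mod_eq_zero_iff_dvd]
      rw [if_congr hcond rfl rfl]
      apply ih _ _ _ hJ
      split_ifs
      · simp only [List.length_append, List.length_cons, List.length_nil]
        push_cast
        omega
      · omega

-- ===== VERDICT (by name: the statement is the Claim_ definition above) =====
theorem jam_list_spec : Claim_equal_jam_list := by
  intro N J _ hpre
  unfold Spec_jam_list jam_list jam_list_alt
  exact loop_eq (jamFuel J) _ J [] hpre.1 (by simp; exact hpre.1)
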